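-- pv_equiv track=rewrite | github.com/pward6/csce410-team5 | utils/posting_list.py | text_to_posting_list
-- ===== SOURCE A (Python) =====
-- from typing import Dict, List
--
-- def text_to_posting_list(
--     text: str, doc_id: int | str = 0, normalize: bool = True
-- ) -> Dict[str, Dict[int | str, List[int]]]:
--     posting_list: Dict[str, Dict[int | str, List[int]]] = {}
--
--     tokens = text.split()
--
--     for position, token in enumerate(tokens):
--         term = token.lower() if normalize else token
--
--         if term not in posting_list:
--             posting_list[term] = {}
--
--         if doc_id not in posting_list[term]:
--             posting_list[term][doc_id] = []
--
--         posting_list[term][doc_id].append(position)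
--
--     return posting_list
-- ===== SOURCE B (Python) =====
-- def text_to_posting_list(text, doc_id=0, normalize=True):
--     tokens = text.split()
--     terms = [t.lower() for t in tokens] if normalize else tokens
--     return {
--         term: {doc_id: [i for i, u in enumerate(terms) if u == term]}
--         for term in dict.fromkeys(terms)
--     }
-- ===== Notes on version B (the rewrite author's own statement) =====
-- stated objective: simpler
-- what changed: B replaces A's single-pass loop that mutates nested dicts (membership test, insert-empty, append per token) by a two-pass build: normalize all tokens into a terms list once, then one dict comprehension over the ordered-distinct terms (dict.fromkeys) that gathers each term's positions with an enumerate filter.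
import Mathlib
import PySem

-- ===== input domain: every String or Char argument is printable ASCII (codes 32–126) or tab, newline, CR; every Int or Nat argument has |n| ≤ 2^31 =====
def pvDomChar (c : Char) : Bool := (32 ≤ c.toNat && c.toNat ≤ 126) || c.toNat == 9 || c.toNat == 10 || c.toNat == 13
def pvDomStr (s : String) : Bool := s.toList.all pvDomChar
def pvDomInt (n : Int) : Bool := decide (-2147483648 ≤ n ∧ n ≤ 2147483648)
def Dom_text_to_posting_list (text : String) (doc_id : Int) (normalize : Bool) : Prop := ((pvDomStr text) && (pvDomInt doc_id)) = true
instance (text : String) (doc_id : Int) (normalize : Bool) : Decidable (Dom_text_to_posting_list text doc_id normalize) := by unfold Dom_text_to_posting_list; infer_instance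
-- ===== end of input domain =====

-- B replaces A's incremental dict-mutation loop by a two-pass build: normalize all
-- tokens once, then one dict comprehension over the ordered-distinct terms (objective: simpler).
-- ===== PORT A =====
-- one loop iteration of A's 'for position, token in enumerate(tokens)' body
def pvAStep (doc_id : Int) (normalize : Bool)
    (d : PySem.Dict String (PySem.Dict Int (List Int))) (p : Int × String) :
    PySem.Dict String (PySem.Dict Int (List Int)) :=
  let term := if normalize then PySem.Str.lower p.2 else p.2
  let d := if d.contains term then d else d.insert term PySem.Dict.empty
  let inner := d.getD term PySem.Dict.empty
  let inner := if inner.contains doc_id then inner else inner.insert doc_id []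
  let inner := inner.insert doc_id (inner.getD doc_id [] ++ [p.1])
  d.insert term inner

def text_to_posting_list (text : String) (doc_id : Int) (normalize : Bool) : List (String × List (Int × List Int)) :=
  let tokens := PySem.Str.split₀ text
  let posting := (PySem.List.enumerate tokens 0).foldl (pvAStep doc_id normalize) PySem.Dict.empty
  posting.items.map (fun p => (p.1, p.2.items))

-- ===== PORT B =====
def text_to_posting_list_alt (text : String) (doc_id : Int) (normalize : Bool) : List (String × List (Int × List Int)) :=
  let tokens := PySem.Str.split₀ text
  let terms := if normalize then tokens.map PySem.Str.lower else tokens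
  (PySem.List.dedup terms).map (fun term =>
    (term, [(doc_id, ((PySem.List.enumerate terms 0).filter (fun p => p.2 == term)).map (·.1))]))

-- ===== PRECONDITION & SPEC =====
def Spec_text_to_posting_list (text : String) (doc_id : Int) (normalize : Bool) (out : List (String × List (Int × List Int))) : Prop := out = text_to_posting_list_alt text doc_id normalize
instance (text : String) (doc_id : Int) (normalize : Bool) (out : List (String × List (Int × List Int))) : Decidable (Spec_text_to_posting_list text doc_id normalize out) := by unfold Spec_text_to_posting_list; infer_instance

-- ===== CLAIM (what is proved, stated in full; the proofs are below) =====
def Claim_equal_text_to_posting_list : Prop := ∀ (text : String) (doc_id : Int) (normalize : Bool), Dom_text_to_posting_list text doc_id normalize → Spec_text_to_posting_list text doc_id normalize (text_to_posting_list text doc_id normalize)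

-- ===== LEMMAS AND PROOFS =====


theorem enumerate_map {α β : Type} (f : α → β) (xs : List α) (s : Int) :
    PySem.List.enumerate (xs.map f) s = (PySem.List.enumerate xs s).map (fun p => (p.1, f p.2)) := by
  induction xs generalizing s with
  | nil => simp [PySem.List.enumerate_nil]
  | cons x xs ih => simp [PySem.List.enumerate_cons, ih]

theorem step_true (doc_id : Int) (d : PySem.Dict String (PySem.Dict Int (List Int))) (l : List (Int × String)) :
    l.foldl (pvAStep doc_id true) d
      = (l.map (fun p => (p.1, PySem.Str.lower p.2))).foldl (pvAStep doc_id false) d := by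
  rw [List.foldl_map]
  rfl

theorem fold_items (doc_id : Int) (l : List (Int × String)) :
    (l.foldl (pvAStep doc_id false) PySem.Dict.empty).items
      = (PySem.List.dedup (l.map (·.2))).map (fun t =>
          (t, (PySem.Dict.empty : PySem.Dict Int (List Int)).insert doc_id
                ((l.filter (fun p => p.2 == t)).map (·.1)))) := by
  induction l using List.reverseRecOn with
  | nil => simp [PySem.List.dedup, PySem.Dict.empty]
  | append_singleton l p ih =>
    set d := l.foldl (pvAStep doc_id false) PySem.Dict.empty with hd
    have hkeys : d.keys = PySem.List.dedup (l.map (·.2)) := by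
      show d.items.map (·.1) = _
      rw [ih, List.map_map]; simp [Function.comp_def]
    have hnodup : d.keys.Nodup := by
      rw [hkeys, PySem.List.dedup_eq_ofList]; exact PySem.Set.nodup_ofList _
    have hcont : ∀ t, d.contains t = decide (t ∈ l.map (·.2)) := by
      intro t
      rw [PySem.Dict.contains_eq_decide_mem_keys, hkeys]
      simp [PySem.List.dedup_eq_ofList, PySem.Set.mem_ofList]
    rw [List.foldl_append]
    by_cases hp : p.2 ∈ l.map (·.2)
    · have hc : d.contains p.2 = true := by rw [hcont]; exact decide_eq_true hp
      have hmem : (p.2, (PySem.Dict.empty : PySem.Dict Int (List Int)).insert doc_id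
          ((l.filter (fun q => q.2 == p.2)).map (·.1))) ∈ d.items := by
        rw [ih]
        exact List.mem_map.mpr ⟨p.2, by simpa [PySem.List.dedup_eq_ofList, PySem.Set.mem_ofList] using hp, rfl⟩
      have hgetD := PySem.Dict.getD_of_mem_items d hmem hnodup (PySem.Dict.empty : PySem.Dict Int (List Int))
      show (pvAStep doc_id false d p).items = _
      simp only [pvAStep, Bool.false_eq_true, if_false, hc, if_true, hgetD,
        PySem.Dict.contains_insert_self, PySem.Dict.getD_insert_self,
        PySem.Dict.insert_insert_self]
      rw [PySem.Dict.items_insert_of_contains d _ hc, ih, List.map_map]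
      have hded : PySem.List.dedup ((l ++ [p]).map (·.2)) = PySem.List.dedup (l.map (·.2)) := by
        simp only [List.map_append, List.map_cons, List.map_nil,
          PySem.List.dedup_eq_ofList, PySem.Set.ofList_append_singleton]
        have hpS : p.2 ∈ PySem.Set.ofList (l.map (·.2)) := by
          simpa [PySem.Set.mem_ofList] using hp
        exact PySem.Set.add_of_mem hpS
      rw [hded]
      refine List.map_congr_left ?_
      intro t ht
      by_cases hteq : t = p.2
      · subst hteq
        simp [List.filter_append]
      · have hne2 : (p.2 == t) = false := beq_eq_false_iff_ne.mpr (fun h => hteq h.symm)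
        simp [List.filter_append, hne2, hteq]
    · have hc : d.contains p.2 = false := by rw [hcont]; exact decide_eq_false hp
      have hg : (d.insert p.2 (PySem.Dict.empty : PySem.Dict Int (List Int))).getD p.2 PySem.Dict.empty
          = PySem.Dict.empty := PySem.Dict.getD_insert_self _ _ _ _
      show (pvAStep doc_id false d p).items = _
      simp only [pvAStep, Bool.false_eq_true, if_false, hc,
        hg, PySem.Dict.contains_empty, PySem.Dict.getD_insert_self,
        PySem.Dict.insert_insert_self, List.nil_append]
      rw [PySem.Dict.items_insert_of_not_contains d _ hc, ih]
      have hnd : p.2 ∉ PySem.List.dedup (l.map (·.2)) := by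
        simpa [PySem.List.dedup_eq_ofList, PySem.Set.mem_ofList] using hp
      have hded : PySem.List.dedup ((l ++ [p]).map (·.2))
          = PySem.List.dedup (l.map (·.2)) ++ [p.2] := by
        simp only [List.map_append, List.map_cons, List.map_nil,
          PySem.List.dedup_eq_ofList, PySem.Set.ofList_append_singleton]
        exact PySem.Set.add_of_not_mem (by simpa [PySem.Set.mem_ofList] using hp)
      rw [hded, List.map_append]
      congr 1
      · refine List.map_congr_left ?_
        intro t ht
        have hne2 : (p.2 == t) = false :=
          beq_eq_false_iff_ne.mpr (fun h => hnd (h ▸ ht))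
        simp [List.filter_append, hne2]
      · have hfl : l.filter (fun q => q.2 == p.2) = [] := by
          rw [List.filter_eq_nil_iff]
          intro q hq
          simp only [beq_eq_false_iff_ne, ne_eq, Bool.not_eq_true]
          intro h; exact hp (List.mem_map.mpr ⟨q, hq, h⟩)
        simp [List.filter_append, hfl]

theorem inner_items (doc_id : Int) (ps : List Int) :
    ((PySem.Dict.empty : PySem.Dict Int (List Int)).insert doc_id ps).items = [(doc_id, ps)] := by
  rw [PySem.Dict.items_insert_of_not_contains _ _ (by simp)]
  rfl

theorem text_to_posting_list_spec : Claim_equal_text_to_posting_list := by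
  intro text doc_id normalize _
  unfold Spec_text_to_posting_list text_to_posting_list text_to_posting_list_alt
  cases normalize with
  | false =>
    simp only [Bool.false_eq_true, if_false]
    rw [fold_items, List.map_map, PySem.List.map_snd_enumerate]
    refine List.map_congr_left ?_
    intro t _
    simp [inner_items]
  | true =>
    simp only [if_true]
    rw [step_true, ← enumerate_map, fold_items, List.map_map, PySem.List.map_snd_enumerate]
    refine List.map_congr_left ?_
    intro t _
    simp [inner_items]
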